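-- pv_equiv track=rewrite | github.com/adanzl/leetcode-practice | py/q2500/Q2575.py | divisibilityArray
-- ===== SOURCE A (Python) =====
-- from typing import List
--
-- def divisibilityArray(word: str, m: int) -> List[int]:
--     n = len(word)
--     ans = [0] * n
--     r = 0
--     for i in range(n):
--         r = (r * 10 + int(word[i])) % m
--         if r == 0:
--             ans[i] = 1
--     return ans
-- ===== SOURCE B (Python) =====
-- from typing import List
--
-- def divisibilityArray(word: str, m: int) -> List[int]:
--     digits = [int(c) for c in word]
--     return [
--         1 if sum(d * 10 ** k for k, d in enumerate(reversed(digits[:i + 1]))) % m == 0 else 0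
--         for i in range(len(digits))
--     ]
-- ===== Notes on version B (the rewrite author's own statement) =====
-- stated objective: alternative
-- what changed: B drops A's carried modular remainder entirely: for each prefix it recomputes the exact integer value from scratch as a place-value sum (digit times power of 10 over the reversed prefix) and tests that value mod m, a quadratic brute-force by definition instead of A's linear streaming recurrence.
-- outside the precondition, e.g. on divisibilityArray('', 0): A returns [], B returns []
import Mathlib
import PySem

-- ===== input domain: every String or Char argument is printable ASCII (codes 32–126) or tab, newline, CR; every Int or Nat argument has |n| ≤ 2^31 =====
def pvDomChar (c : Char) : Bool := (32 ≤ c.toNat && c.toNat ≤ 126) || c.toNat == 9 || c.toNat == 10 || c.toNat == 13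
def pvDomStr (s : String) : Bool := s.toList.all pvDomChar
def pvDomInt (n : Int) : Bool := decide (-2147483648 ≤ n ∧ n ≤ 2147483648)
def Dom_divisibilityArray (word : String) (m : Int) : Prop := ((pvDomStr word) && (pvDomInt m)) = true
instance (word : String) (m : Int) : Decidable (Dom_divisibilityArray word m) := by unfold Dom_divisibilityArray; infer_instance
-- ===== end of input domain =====

-- B drops A's carried modular remainder: it recomputes each prefix value from scratch as a
-- place-value sum over the reversed prefix and tests that value mod m (alternative decomposition, not faster).


-- ===== PORT A =====
-- int(c) for a single character c (exact on Pre_'s digit-only domain; getD 0 is unreachable there)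
def pvDigitVal (c : Char) : Int := (PySem.Int.ofStr? (String.singleton c)).getD 0

-- A's loop: walk the characters keeping the index i, the array ans and the remainder r
def pvAGo (m : Int) (i : Nat) (ans : List Int) (r : Int) : List Char → List Int
  | [] => ans
  | c :: cs =>
    let r' := PySem.Int.mod (r * 10 + pvDigitVal c) m
    pvAGo m (i + 1) (if r' == 0 then ans.set i 1 else ans) r' cs

def divisibilityArray (word : String) (m : Int) : List Int :=
  pvAGo m 0 (List.replicate word.toList.length 0) 0 word.toList

-- ===== PORT B =====
-- B: digits once, then for each i the exact prefix value as sum of d * 10^k over the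
-- reversed prefix (k is the position from the right; kd.1.toNat is exact since enumerate starts at 0)
def divisibilityArray_alt (word : String) (m : Int) : List Int :=
  let digits := word.toList.map pvDigitVal
  (List.range digits.length).map (fun i =>
    let v := ((PySem.List.enumerate (digits.take (i + 1)).reverse 0).map
                (fun kd => kd.2 * 10 ^ kd.1.toNat)).sum
    if PySem.Int.mod v m == 0 then 1 else 0)

-- ===== PRECONDITION & SPEC =====
-- Pre_ excludes exactly where the Python A raises: m = 0 (ZeroDivisionError) and any
-- non-digit character (int(word[i]) raises ValueError). The one returning input this also
-- excludes is the empty word with m = 0, where the loop never runs and both programs give [].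
def Pre_divisibilityArray (word : String) (m : Int) : Prop :=
  m ≠ 0 ∧ word.toList.all Char.isDigit = true
instance (word : String) (m : Int) : Decidable (Pre_divisibilityArray word m) := by
  unfold Pre_divisibilityArray; infer_instance
def pvWitness_divisibilityArray : String × Int := ("998244353", 3)

def Spec_divisibilityArray (word : String) (m : Int) (out : List Int) : Prop := out = divisibilityArray_alt word m
instance (word : String) (m : Int) (out : List Int) : Decidable (Spec_divisibilityArray word m out) := by unfold Spec_divisibilityArray; infer_instance

-- ===== CLAIM (what is proved, stated in full; the proofs are below) =====
def Claim_equal_divisibilityArray : Prop := ∀ (word : String) (m : Int), Dom_divisibilityArray word m → Pre_divisibilityArray word m → Spec_divisibilityArray word m (divisibilityArray word m)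

-- ===== LEMMAS AND PROOFS =====

-- reference value of a digit list read left to right, seeded with c
def pvValFrom (c : Int) (l : List Int) : Int := l.foldl (fun a d => a * 10 + d) c

-- A's loop as a plain flag list (proof-side restatement of pvAGo's effect)
def pvFlags (m r : Int) : List Int → List Int
  | [] => []
  | d :: ds =>
    let r' := PySem.Int.mod (r * 10 + d) m
    (if r' == 0 then 1 else 0) :: pvFlags m r' ds

theorem pvAGo_eq (m : Int) (cs : List Char) :
    ∀ (pre : List Int) (r : Int),
      pvAGo m pre.length (pre ++ List.replicate cs.length 0) r cs
        = pre ++ pvFlags m r (cs.map pvDigitVal) := by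
  induction cs with
  | nil => intro pre r; simp [pvAGo, pvFlags]
  | cons c cs ih =>
    intro pre r
    simp only [pvAGo, pvFlags, List.map, List.length_cons, List.replicate_succ]
    set r' := PySem.Int.mod (r * 10 + pvDigitVal c) m with hr'
    have hset : (pre ++ 0 :: List.replicate cs.length 0).set pre.length 1
        = pre ++ 1 :: List.replicate cs.length 0 := by
      rw [List.set_append]; simp
    have key : (if r' == 0 then (pre ++ 0 :: List.replicate cs.length 0).set pre.length 1
                 else pre ++ 0 :: List.replicate cs.length 0)
        = (pre ++ [if r' == 0 then 1 else 0]) ++ List.replicate cs.length 0 := by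
      by_cases h : r' == 0 <;> simp [h, hset]
    rw [key]
    have hlen : (pre ++ [if r' == 0 then (1 : Int) else 0]).length = pre.length + 1 := by simp
    have := ih (pre ++ [if r' == 0 then (1 : Int) else 0]) r'
    rw [hlen] at this
    rw [this]
    simp

-- PySem.Int.mod is congruent to its argument modulo m
theorem pvMod_modEq (a m : Int) : PySem.Int.mod a m ≡ a [ZMOD m] := by
  have h := PySem.Int.floordiv_mul_add_mod a m
  have hd : m ∣ a - PySem.Int.mod a m := ⟨PySem.Int.floordiv a m, by linarith⟩
  exact Int.modEq_iff_dvd.mpr hd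

-- the invariant: pvFlags with any remainder congruent to the carried value c produces
-- exactly the divisibility flags of the prefix values seeded with c
theorem pvFlags_eq (m : Int) (ds : List Int) :
    ∀ (r c : Int), r ≡ c [ZMOD m] →
      pvFlags m r ds
        = (List.range ds.length).map (fun i =>
            if m ∣ pvValFrom c (ds.take (i + 1)) then 1 else 0) := by
  induction ds with
  | nil => intro r c _; simp [pvFlags]
  | cons d ds ih =>
    intro r c hrc
    have hq : r * 10 + d ≡ c * 10 + d [ZMOD m] := (hrc.mul_right 10).add_right d
    have hstep : PySem.Int.mod (r * 10 + d) m ≡ c * 10 + d [ZMOD m] :=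
      (pvMod_modEq (r * 10 + d) m).trans hq
    have h0 : PySem.Int.mod (r * 10 + d) m = 0 ↔ m ∣ (c * 10 + d) := by
      rw [PySem.Int.mod_eq_zero_iff_dvd]
      constructor
      · intro h; exact Int.modEq_zero_iff_dvd.mp (hq.symm.trans (Int.modEq_zero_iff_dvd.mpr h))
      · intro h; exact Int.modEq_zero_iff_dvd.mp (hq.trans (Int.modEq_zero_iff_dvd.mpr h))
    have hhead : (if (PySem.Int.mod (r * 10 + d) m == 0) then (1 : Int) else 0)
        = (if m ∣ (c * 10 + d) then (1 : Int) else 0) := by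
      by_cases h : m ∣ (c * 10 + d)
      · simp [h0.mpr h, h]
      · have hne : PySem.Int.mod (r * 10 + d) m ≠ 0 := fun he => h (h0.mp he)
        simp [hne, h]
    have htail := ih (PySem.Int.mod (r * 10 + d) m) (c * 10 + d) hstep
    simp only [pvFlags, List.length_cons, List.range_succ_eq_map, List.map_cons, List.map_map,
      List.take_succ_cons]
    refine congrArg₂ _ ?_ ?_
    · simpa [pvValFrom] using hhead
    · rw [htail]
      apply List.map_congr_left
      intro i _
      simp [Function.comp, pvValFrom]

-- shifting enumerate's start by one multiplies the place-value sum by 10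
theorem pvShift (xs : List Int) :
    ∀ s : Int, 0 ≤ s →
      ((PySem.List.enumerate xs (s + 1)).map (fun kd => kd.2 * 10 ^ kd.1.toNat)).sum
        = 10 * ((PySem.List.enumerate xs s).map (fun kd => kd.2 * 10 ^ kd.1.toNat)).sum := by
  induction xs with
  | nil => intro s _; simp [PySem.List.enumerate_nil]
  | cons x xs ih =>
    intro s hs
    rw [PySem.List.enumerate_cons, PySem.List.enumerate_cons]
    simp only [List.map_cons, List.sum_cons]
    rw [ih (s + 1) (by omega)]
    have ht : (s + 1).toNat = s.toNat + 1 := by omega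
    rw [ht]
    ring

-- the place-value sum over the reversed prefix equals the left-to-right fold value
theorem pvPlace_eq (l : List Int) :
    ((PySem.List.enumerate l.reverse 0).map (fun kd => kd.2 * 10 ^ kd.1.toNat)).sum
      = pvValFrom 0 l := by
  induction l using List.reverseRecOn with
  | nil => simp [PySem.List.enumerate_nil, pvValFrom]
  | append_singleton l d ih =>
    rw [List.reverse_append]
    simp only [List.reverse_cons, List.reverse_nil, List.nil_append, List.singleton_append,
      PySem.List.enumerate_cons, List.map_cons, List.sum_cons]
    rw [show (0 : Int) + 1 = 0 + 1 from rfl, pvShift l.reverse 0 (le_refl 0), ih]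
    simp only [pvValFrom, List.foldl_append, List.foldl_cons, List.foldl_nil, Int.toNat_zero,
      pow_zero, mul_one]
    ring

-- ===== VERDICT (by name: the statement is the Claim_ definition above) =====
theorem divisibilityArray_spec : Claim_equal_divisibilityArray := by
  intro word m _ hpre
  unfold Spec_divisibilityArray divisibilityArray divisibilityArray_alt
  have hA := pvAGo_eq m word.toList ([] : List Int) 0
  simp only [List.length_nil, List.nil_append] at hA
  rw [hA, pvFlags_eq m (word.toList.map pvDigitVal) 0 0 (Int.ModEq.refl 0)]
  simp only [List.length_map]
  apply List.map_congr_left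
  intro i _
  simp only [pvPlace_eq]
  have h0 : PySem.Int.mod (pvValFrom 0 ((word.toList.map pvDigitVal).take (i + 1))) m = 0
      ↔ m ∣ pvValFrom 0 ((word.toList.map pvDigitVal).take (i + 1)) :=
    PySem.Int.mod_eq_zero_iff_dvd _ _
  by_cases h : m ∣ pvValFrom 0 ((word.toList.map pvDigitVal).take (i + 1))
  · simp [h0.mpr h, h]
  · have hne : PySem.Int.mod (pvValFrom 0 ((word.toList.map pvDigitVal).take (i + 1))) m ≠ 0 :=
      fun he => h (h0.mp he)
    simp [hne, h]
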